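-- pv_equiv track=rewrite | github.com/erfans-sketch/math-construct-problems | CT11/solution.py | _build_marks
-- ===== SOURCE A (Python) =====
-- from typing import List, Tuple, Set
--
-- def _build_marks(n: int) -> Set[Tuple[int, int]]:
--     """
--     Construct the set of marked interior intersections (turn-right posters)
--     according to the constructive pattern described in the solution.
--
--     Patterns by n mod 3:
--     - n = 3k + 2 (n >= 2): (2,1), (3,3), (5,4), (6,6), ... up to within (n-2, n-2)
--     - n = 3k + 1 (n >= 4): (2,1), (1,2), (4,3), (5,5), (7,6), ... up to within (n-2, n-2)
--     - n = 3k     (n >= 6): (2,1), (1,2), (3,2), (4,4), (6,5), (7,7), ... up to within (n-2, n-2)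
--
--     We always keep points strictly inside: 1 <= x,y <= n-1. We stop before exceeding n-2.
--     """
--     marks: Set[Tuple[int, int]] = set()
--     t = n - 2
--     if t < 1:
--         return marks
--
--     rem = n % 3
--
--     def add_point(p: Tuple[int, int]):
--         x, y = p
--         if 1 <= x <= t and 1 <= y <= t:
--             marks.add((x, y))
--
--     # Alternating small diagonal-forward steps used after seeding
--     alternates = [(1, 2), (2, 1)]
--
--     if rem == 2:
--         # Start at (2,1) then alternate +1,+2 and +2,+1
--         pos = (2, 1)
--         add_point(pos)
--         idx = 0
--         while True:
--             nx = pos[0] + alternates[idx][0]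
--             ny = pos[1] + alternates[idx][1]
--             if nx > t or ny > t:
--                 break
--             pos = (nx, ny)
--             add_point(pos)
--             idx ^= 1
--
--     elif rem == 1:
--         # Seed: (2,1), (1,2), (4,3); then alternate starting with +1,+2
--         pos = None
--         for s in [(2, 1), (1, 2), (4, 3)]:
--             if s[0] <= t and s[1] <= t:
--                 add_point(s)
--                 pos = s
--         if pos == (4, 3):
--             idx = 0  # next +1,+2, then +2,+1...
--             while True:
--                 nx = pos[0] + alternates[idx][0]
--                 ny = pos[1] + alternates[idx][1]
--                 if nx > t or ny > t:
--                     break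
--                 pos = (nx, ny)
--                 add_point(pos)
--                 idx ^= 1
--         # If pos is (1,2) or (2,1) only, we're done; nothing further fits within bounds.
--
--     else:  # rem == 0
--         # Seed: (2,1), (1,2), (3,2), (4,4); then alternate starting with +2,+1
--         pos = None
--         for s in [(2, 1), (1, 2), (3, 2), (4, 4)]:
--             if s[0] <= t and s[1] <= t:
--                 add_point(s)
--                 pos = s
--         if pos == (4, 4):
--             idx = 1  # next +2,+1, then +1,+2...
--             while True:
--                 nx = pos[0] + alternates[idx][0]
--                 ny = pos[1] + alternates[idx][1]
--                 if nx > t or ny > t: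
--                     break
--                 pos = (nx, ny)
--                 add_point(pos)
--                 idx ^= 1
--         # If pos is earlier in the seed list, no more points fit; stop.
--
--     return marks
-- ===== SOURCE B (Python) =====
-- from typing import Set, Tuple
--
-- def _build_marks(n: int) -> Set[Tuple[int, int]]:
--     """Closed-form version: the marks of each n%3 class are a short seed list
--     plus two interleaved arithmetic progressions with common difference (3,3),
--     indexed directly by i instead of stepping a running position."""
--     marks: Set[Tuple[int, int]] = set()
--     t = n - 2
--     if t < 1:
--         return marks
--     rem = n % 3
--     if rem == 2:
--         seeds, p1, p2 = [], (2, 1), (3, 3)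
--     elif rem == 1:
--         seeds, p1, p2 = [(2, 1), (1, 2)], (4, 3), (5, 5)
--     else:
--         seeds, p1, p2 = [(2, 1), (1, 2), (3, 2)], (4, 4), (6, 5)
--     for s in seeds:
--         if s[0] <= t and s[1] <= t:
--             marks.add(s)
--     i = 0
--     while p1[0] + 3 * i <= t:
--         marks.add((p1[0] + 3 * i, p1[1] + 3 * i))
--         if p2[0] + 3 * i <= t and p2[1] + 3 * i <= t:
--             marks.add((p2[0] + 3 * i, p2[1] + 3 * i))
--         i += 1
--     return marks
-- ===== Notes on version B (the rewrite author's own statement) =====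
-- stated objective: simpler
-- what changed: Replaces A's stateful walk (running position, alternating step index idx^=1, seed/pos bookkeeping and a pos==seed test) by per-class seed lists plus two interleaved arithmetic progressions (p1+3i, p2+3i) generated directly from the index i.
import Mathlib
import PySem

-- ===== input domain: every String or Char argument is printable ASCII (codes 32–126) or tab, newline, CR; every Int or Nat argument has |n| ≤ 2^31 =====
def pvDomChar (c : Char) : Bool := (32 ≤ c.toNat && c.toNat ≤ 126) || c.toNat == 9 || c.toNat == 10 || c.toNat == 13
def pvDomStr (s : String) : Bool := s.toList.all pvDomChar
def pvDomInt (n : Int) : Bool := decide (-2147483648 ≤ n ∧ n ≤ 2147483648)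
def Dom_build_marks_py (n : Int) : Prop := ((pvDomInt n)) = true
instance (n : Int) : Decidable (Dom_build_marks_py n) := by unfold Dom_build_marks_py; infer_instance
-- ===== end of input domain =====

-- B replaces A's stateful walk (running pos, alternating step idx, seed/pos tracking) by
-- per-class seed lists plus two arithmetic progressions indexed directly by i (objective: simpler).

-- ===== PORT A =====
-- add_point: add (x,y) to the set if 1 <= x <= t and 1 <= y <= t
def pvAddPoint (t : Int) (marks : List (Int × Int)) (p : Int × Int) : List (Int × Int) :=
  if 1 ≤ p.1 ∧ p.1 ≤ t ∧ 1 ≤ p.2 ∧ p.2 ≤ t then PySem.Set.add marks p else marks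

-- the 'while True' loop: alternates[idx] for idx ∈ {0,1} is (1,2) / (2,1); idx ^= 1 each step
def pvLoopA (t : Int) (pos : Int × Int) (idx : Nat) (marks : List (Int × Int)) :
    List (Int × Int) :=
  let dx : Int := if idx = 0 then 1 else 2   -- alternates[idx][0]
  let dy : Int := if idx = 0 then 2 else 1   -- alternates[idx][1]
  if pos.1 + dx > t ∨ pos.2 + dy > t then marks
  else pvLoopA t (pos.1 + dx, pos.2 + dy) (idx ^^^ 1)
        (pvAddPoint t marks (pos.1 + dx, pos.2 + dy))
termination_by (t + 1 - pos.1).toNat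
decreasing_by
  rename_i h
  simp only [not_or, not_lt] at h
  by_cases hidx : idx = 0
  · subst hidx
    simp only [dx, dy, reduceDIte] at h ⊢
    omega
  · simp only [dx, dy, dif_neg hidx] at h ⊢
    omega

-- the seed 'for s in […]' loop: (pos, marks) state
def pvSeedLoop (t : Int) (seeds : List (Int × Int))
    (st : Option (Int × Int) × List (Int × Int)) : Option (Int × Int) × List (Int × Int) :=
  seeds.foldl (fun st s =>
    if s.1 ≤ t ∧ s.2 ≤ t then (some s, pvAddPoint t st.2 s) else st) st

def build_marks_py (n : Int) : List (Int × Int) :=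
  let marks : List (Int × Int) := PySem.Set.ofList []
  let t := n - 2
  if t < 1 then marks
  else
    let rem := PySem.Int.mod n 3
    if rem = 2 then
      let pos : Int × Int := (2, 1)
      let marks := pvAddPoint t marks pos
      pvLoopA t pos 0 marks
    else if rem = 1 then
      let st := pvSeedLoop t [(2, 1), (1, 2), (4, 3)] (none, marks)
      if st.1 = some (4, 3) then pvLoopA t (4, 3) 0 st.2 else st.2
    else
      let st := pvSeedLoop t [(2, 1), (1, 2), (3, 2), (4, 4)] (none, marks)
      if st.1 = some (4, 4) then pvLoopA t (4, 4) 1 st.2 else st.2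

-- ===== PORT B =====
-- the 'while p1[0] + 3*i <= t' loop of Source B
def pvLoopB (t : Int) (p1 p2 : Int × Int) (i : Int) (marks : List (Int × Int)) :
    List (Int × Int) :=
  if p1.1 + 3 * i ≤ t then
    let m1 := PySem.Set.add marks (p1.1 + 3 * i, p1.2 + 3 * i)
    let m2 := if p2.1 + 3 * i ≤ t ∧ p2.2 + 3 * i ≤ t then
                PySem.Set.add m1 (p2.1 + 3 * i, p2.2 + 3 * i) else m1
    pvLoopB t p1 p2 (i + 1) m2
  else marks
termination_by (t + 1 - (p1.1 + 3 * i)).toNat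
decreasing_by
  rename_i h
  omega

def build_marks_py_alt (n : Int) : List (Int × Int) :=
  let marks : List (Int × Int) := PySem.Set.ofList []
  let t := n - 2
  if t < 1 then marks
  else
    let rem := PySem.Int.mod n 3
    let cfg : List (Int × Int) × (Int × Int) × (Int × Int) :=
      if rem = 2 then ([], (2, 1), (3, 3))
      else if rem = 1 then ([(2, 1), (1, 2)], (4, 3), (5, 5))
      else ([(2, 1), (1, 2), (3, 2)], (4, 4), (6, 5))
    let marks := cfg.1.foldl (fun m s =>
      if s.1 ≤ t ∧ s.2 ≤ t then PySem.Set.add m s else m) marks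
    pvLoopB t cfg.2.1 cfg.2.2 0 marks

-- ===== PRECONDITION & SPEC =====
def Spec_build_marks_py (n : Int) (out : List (Int × Int)) : Prop := out = build_marks_py_alt n
instance (n : Int) (out : List (Int × Int)) : Decidable (Spec_build_marks_py n out) := by unfold Spec_build_marks_py; infer_instance

-- ===== CLAIM (what is proved, stated in full; the proofs are below) =====
def Claim_equal_build_marks_py : Prop := ∀ (n : Int), Dom_build_marks_py n → Spec_build_marks_py n (build_marks_py n)

-- ===== LEMMAS AND PROOFS =====

-- one-step unfoldings of the loops
theorem pvLoopA_unfold0 (t x y : Int) (marks : List (Int × Int)) :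
    pvLoopA t (x, y) 0 marks =
      if x + 1 > t ∨ y + 2 > t then marks
      else pvLoopA t (x + 1, y + 2) 1 (pvAddPoint t marks (x + 1, y + 2)) := by
  rw [pvLoopA]; norm_num

theorem pvLoopA_unfold1 (t x y : Int) (marks : List (Int × Int)) :
    pvLoopA t (x, y) 1 marks =
      if x + 2 > t ∨ y + 1 > t then marks
      else pvLoopA t (x + 2, y + 1) 0 (pvAddPoint t marks (x + 2, y + 1)) := by
  rw [pvLoopA]; norm_num

theorem pvLoopB_unfold (t : Int) (p1 p2 : Int × Int) (i : Int) (marks : List (Int × Int)) :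
    pvLoopB t p1 p2 i marks =
      if p1.1 + 3 * i ≤ t then
        pvLoopB t p1 p2 (i + 1)
          (if p2.1 + 3 * i ≤ t ∧ p2.2 + 3 * i ≤ t then
              PySem.Set.add (PySem.Set.add marks (p1.1 + 3 * i, p1.2 + 3 * i))
                (p2.1 + 3 * i, p2.2 + 3 * i)
            else PySem.Set.add marks (p1.1 + 3 * i, p1.2 + 3 * i))
      else marks := by
  rw [pvLoopB]

theorem pvAddPoint_pos (t : Int) (m : List (Int × Int)) (p : Int × Int)
    (h : 1 ≤ p.1 ∧ p.1 ≤ t ∧ 1 ≤ p.2 ∧ p.2 ≤ t) :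
    pvAddPoint t m p = PySem.Set.add m p := by
  rw [pvAddPoint, if_pos h]

theorem pvAddPoint_neg (t : Int) (m : List (Int × Int)) (p : Int × Int)
    (h : ¬(1 ≤ p.1 ∧ p.1 ≤ t ∧ 1 ≤ p.2 ∧ p.2 ≤ t)) :
    pvAddPoint t m p = m := by
  rw [pvAddPoint, if_neg h]

-- A's loop from a position (x+3i, x-1+3i) with idx = 0 equals B's loop on the
-- progressions p1 = (x, x-1), p2 = (x+1, x+1) starting at index i.
theorem pvLoopA_eq_B_idx0 (t x : Int) (hx : 2 ≤ x) :
    ∀ (k : Nat) (i : Int) (marks : List (Int × Int)), 0 ≤ i →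
      (t + 1 - (x + 3 * i)).toNat ≤ k →
      pvLoopA t (x + 3 * i, x - 1 + 3 * i) 0
        (pvAddPoint t marks (x + 3 * i, x - 1 + 3 * i))
        = pvLoopB t (x, x - 1) (x + 1, x + 1) i marks := by
  intro k
  induction k with
  | zero =>
    intro i marks hi hk
    have h1 : ¬ (x + 3 * i ≤ t) := by omega
    rw [pvAddPoint_neg t marks _ (by simpa using by omega)]
    rw [pvLoopA_unfold0, if_pos (by omega)]
    rw [pvLoopB_unfold]
    simp only []
    rw [if_neg (by omega)]
  | succ k ih =>
    intro i marks hi hk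
    by_cases h1 : x + 3 * i ≤ t
    · rw [pvAddPoint_pos t marks _ (by simpa using by omega)]
      rw [pvLoopB_unfold]
      simp only []
      rw [if_pos (by omega)]
      rw [pvLoopA_unfold0]
      by_cases h2 : x + 3 * i + 1 ≤ t
      · rw [if_neg (by omega)]
        rw [pvAddPoint_pos t _ _ (by simpa using by omega)]
        rw [if_pos (by constructor <;> omega)]
        have e1 : x + 3 * i + 1 = x + 1 + 3 * i := by ring
        have e2 : x - 1 + 3 * i + 2 = x + 1 + 3 * i := by ring
        rw [e1, e2]
        rw [pvLoopA_unfold1]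
        by_cases h3 : x + 1 + 3 * i + 2 ≤ t
        · rw [if_neg (by omega)]
          have e3 : x + 1 + 3 * i + 2 = x + 3 * (i + 1) := by ring
          have e4 : x + 1 + 3 * i + 1 = x - 1 + 3 * (i + 1) := by ring
          rw [e3, e4]
          exact ih (i + 1) _ (by omega) (by omega)
        · rw [if_pos (by omega)]
          rw [pvLoopB_unfold]
          simp only []
          rw [if_neg (by omega)]
      · rw [if_pos (by omega)]
        rw [if_neg (by omega)]
        rw [pvLoopB_unfold]
        simp only []
        rw [if_neg (by omega)]
    · rw [pvAddPoint_neg t marks _ (by simpa using by omega)]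
      rw [pvLoopA_unfold0, if_pos (by omega)]
      rw [pvLoopB_unfold]
      simp only []
      rw [if_neg (by omega)]

-- A's loop from a position (x+3i, x+3i) with idx = 1 equals B's loop on the
-- progressions p1 = (x, x), p2 = (x+2, x+1) starting at index i.
theorem pvLoopA_eq_B_idx1 (t x : Int) (hx : 2 ≤ x) :
    ∀ (k : Nat) (i : Int) (marks : List (Int × Int)), 0 ≤ i →
      (t + 1 - (x + 3 * i)).toNat ≤ k →
      pvLoopA t (x + 3 * i, x + 3 * i) 1
        (pvAddPoint t marks (x + 3 * i, x + 3 * i))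
        = pvLoopB t (x, x) (x + 2, x + 1) i marks := by
  intro k
  induction k with
  | zero =>
    intro i marks hi hk
    rw [pvAddPoint_neg t marks _ (by simpa using by omega)]
    rw [pvLoopA_unfold1, if_pos (by omega)]
    rw [pvLoopB_unfold]
    simp only []
    rw [if_neg (by omega)]
  | succ k ih =>
    intro i marks hi hk
    by_cases h1 : x + 3 * i ≤ t
    · rw [pvAddPoint_pos t marks _ (by simpa using by omega)]
      rw [pvLoopB_unfold]
      simp only []
      rw [if_pos (by omega)]
      rw [pvLoopA_unfold1]
      by_cases h2 : x + 3 * i + 2 ≤ t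
      · rw [if_neg (by omega)]
        rw [pvAddPoint_pos t _ _ (by simpa using by omega)]
        rw [if_pos (by constructor <;> omega)]
        have e1 : x + 3 * i + 2 = x + 2 + 3 * i := by ring
        have e2 : x + 3 * i + 1 = x + 1 + 3 * i := by ring
        rw [e1, e2]
        rw [pvLoopA_unfold0]
        by_cases h3 : x + 2 + 3 * i + 1 ≤ t
        · rw [if_neg (by omega)]
          have e3 : x + 2 + 3 * i + 1 = x + 3 * (i + 1) := by ring
          have e4 : x + 1 + 3 * i + 2 = x + 3 * (i + 1) := by ring
          rw [e3, e4]
          exact ih (i + 1) _ (by omega) (by omega)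
        · rw [if_pos (by omega)]
          rw [pvLoopB_unfold]
          simp only []
          rw [if_neg (by omega)]
      · rw [if_pos (by omega)]
        rw [if_neg (by omega)]
        rw [pvLoopB_unfold]
        simp only []
        rw [if_neg (by omega)]
    · rw [pvAddPoint_neg t marks _ (by simpa using by omega)]
      rw [pvLoopA_unfold1, if_pos (by omega)]
      rw [pvLoopB_unfold]
      simp only []
      rw [if_neg (by omega)]

-- ===== VERDICT (by name: the statement is the Claim_ definition above) =====
theorem build_marks_py_spec : Claim_equal_build_marks_py := by
  unfold Claim_equal_build_marks_py
  intro n _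
  unfold Spec_build_marks_py
  simp only [build_marks_py, build_marks_py_alt]
  by_cases ht : n - 2 < 1
  · simp only [if_pos ht]
  · have hm : PySem.Int.mod n 3 = n % 3 := PySem.Int.mod_eq_emod_of_pos (by norm_num)
    simp only [if_neg ht]
    by_cases hr2 : PySem.Int.mod n 3 = 2
    · simp only [if_pos hr2, List.foldl]
      have := pvLoopA_eq_B_idx0 (n - 2) 2 (le_refl 2) ((n - 2 + 1 - 2).toNat) 0
        (PySem.Set.ofList []) le_rfl le_rfl
      norm_num at this
      exact this
    · by_cases hr1 : PySem.Int.mod n 3 = 1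
      · simp only [if_neg hr2, if_pos hr1, pvSeedLoop, List.foldl]
        by_cases h4 : 4 ≤ n - 2
        · have c1 : (2:Int) ≤ n - 2 ∧ (1:Int) ≤ n - 2 := by omega
          have c2 : (1:Int) ≤ n - 2 ∧ (2:Int) ≤ n - 2 := by omega
          have c3 : (4:Int) ≤ n - 2 ∧ (3:Int) ≤ n - 2 := by omega
          simp only [if_pos c1, if_pos c2, if_pos c3]
          rw [if_pos trivial]
          rw [pvAddPoint_pos _ _ _ (by omega), pvAddPoint_pos _ _ _ (by omega),
              pvAddPoint_pos _ _ _ (by omega)]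
          have key := pvLoopA_eq_B_idx0 (n - 2) 4 (by norm_num) ((n - 2 + 1 - 4).toNat) 0
            (PySem.Set.add (PySem.Set.add (PySem.Set.ofList []) (2, 1)) (1, 2)) le_rfl le_rfl
          norm_num at key
          rw [pvAddPoint_pos _ _ _ (by omega)] at key
          exact key
        · by_cases h2 : 2 ≤ n - 2
          · have c1 : (2:Int) ≤ n - 2 ∧ (1:Int) ≤ n - 2 := by omega
            have c2 : (1:Int) ≤ n - 2 ∧ (2:Int) ≤ n - 2 := by omega
            have nc3 : ¬((4:Int) ≤ n - 2 ∧ (3:Int) ≤ n - 2) := by omega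
            simp only [if_pos c1, if_pos c2, if_neg nc3]
            rw [if_neg (by simp)]
            rw [pvLoopB_unfold, if_neg (by omega)]
            rw [pvAddPoint_pos _ _ _ (by omega), pvAddPoint_pos _ _ _ (by omega)]
          · have nc1 : ¬((2:Int) ≤ n - 2 ∧ (1:Int) ≤ n - 2) := by omega
            have nc2 : ¬((1:Int) ≤ n - 2 ∧ (2:Int) ≤ n - 2) := by omega
            have nc3 : ¬((4:Int) ≤ n - 2 ∧ (3:Int) ≤ n - 2) := by omega
            simp only [if_neg nc1, if_neg nc2, if_neg nc3]
            rw [if_neg (by simp)]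
            rw [pvLoopB_unfold, if_neg (by omega)]
      · simp only [if_neg hr2, if_neg hr1, pvSeedLoop, List.foldl]
        by_cases h4 : 4 ≤ n - 2
        · have c1 : (2:Int) ≤ n - 2 ∧ (1:Int) ≤ n - 2 := by omega
          have c2 : (1:Int) ≤ n - 2 ∧ (2:Int) ≤ n - 2 := by omega
          have c3 : (3:Int) ≤ n - 2 ∧ (2:Int) ≤ n - 2 := by omega
          have c4 : (4:Int) ≤ n - 2 ∧ (4:Int) ≤ n - 2 := by omega
          simp only [if_pos c1, if_pos c2, if_pos c3, if_pos c4]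
          rw [if_pos trivial]
          rw [pvAddPoint_pos _ _ _ (by omega), pvAddPoint_pos _ _ _ (by omega),
              pvAddPoint_pos _ _ _ (by omega), pvAddPoint_pos _ _ _ (by omega)]
          have key := pvLoopA_eq_B_idx1 (n - 2) 4 (by norm_num) ((n - 2 + 1 - 4).toNat) 0
            (PySem.Set.add (PySem.Set.add (PySem.Set.add (PySem.Set.ofList []) (2, 1)) (1, 2))
              (3, 2)) le_rfl le_rfl
          norm_num at key
          rw [pvAddPoint_pos _ _ _ (by omega)] at key
          exact key
        · by_cases h3 : 3 ≤ n - 2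
          · have c1 : (2:Int) ≤ n - 2 ∧ (1:Int) ≤ n - 2 := by omega
            have c2 : (1:Int) ≤ n - 2 ∧ (2:Int) ≤ n - 2 := by omega
            have c3 : (3:Int) ≤ n - 2 ∧ (2:Int) ≤ n - 2 := by omega
            have nc4 : ¬((4:Int) ≤ n - 2 ∧ (4:Int) ≤ n - 2) := by omega
            simp only [if_pos c1, if_pos c2, if_pos c3, if_neg nc4]
            rw [if_neg (by simp)]
            rw [pvLoopB_unfold, if_neg (by omega)]
            rw [pvAddPoint_pos _ _ _ (by omega), pvAddPoint_pos _ _ _ (by omega),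
                pvAddPoint_pos _ _ _ (by omega)]
          · by_cases h2 : 2 ≤ n - 2
            · have c1 : (2:Int) ≤ n - 2 ∧ (1:Int) ≤ n - 2 := by omega
              have c2 : (1:Int) ≤ n - 2 ∧ (2:Int) ≤ n - 2 := by omega
              have nc3 : ¬((3:Int) ≤ n - 2 ∧ (2:Int) ≤ n - 2) := by omega
              have nc4 : ¬((4:Int) ≤ n - 2 ∧ (4:Int) ≤ n - 2) := by omega
              simp only [if_pos c1, if_pos c2, if_neg nc3, if_neg nc4]
              rw [if_neg (by simp)]
              rw [pvLoopB_unfold, if_neg (by omega)]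
              rw [pvAddPoint_pos _ _ _ (by omega), pvAddPoint_pos _ _ _ (by omega)]
            · have nc1 : ¬((2:Int) ≤ n - 2 ∧ (1:Int) ≤ n - 2) := by omega
              have nc2 : ¬((1:Int) ≤ n - 2 ∧ (2:Int) ≤ n - 2) := by omega
              have nc3 : ¬((3:Int) ≤ n - 2 ∧ (2:Int) ≤ n - 2) := by omega
              have nc4 : ¬((4:Int) ≤ n - 2 ∧ (4:Int) ≤ n - 2) := by omega
              simp only [if_neg nc1, if_neg nc2, if_neg nc3, if_neg nc4]
              rw [if_neg (by simp)]
              rw [pvLoopB_unfold, if_neg (by omega)]
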